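-- pv_equiv track=rewrite | github.com/longqicheng0/Divergence_Monitor | src/strategy/divergence.py | _select_last_two
-- ===== SOURCE A (Python) =====
-- from typing import List, Optional, Tuple
--
-- def _select_last_two(pivots: List[int], min_sep: int, max_sep: int) -> Optional[Tuple[int, int]]:
--     if len(pivots) < 2:
--         return None
--
--     for i in range(len(pivots) - 1, 0, -1):
--         pivot_2 = pivots[i]
--         for j in range(i - 1, -1, -1):
--             pivot_1 = pivots[j]
--             sep = pivot_2 - pivot_1
--             if min_sep <= sep <= max_sep:
--                 return pivot_1, pivot_2
--     return None
-- ===== SOURCE B (Python) =====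
-- from typing import List, Optional, Tuple
--
-- def _select_last_two(pivots: List[int], min_sep: int, max_sep: int) -> Optional[Tuple[int, int]]:
--     rev = pivots[::-1]
--     while rev:
--         p2, rev = rev[0], rev[1:]
--         for p1 in rev:
--             if min_sep <= p2 - p1 <= max_sep:
--                 return p1, p2
--     return None
-- ===== Notes on version B (the rewrite author's own statement) =====
-- stated objective: alternative
-- what changed: A's two descending integer-index loops are replaced by reversing the list once and doing structural recursion on the reversed list (peel head as pivot_2, scan the tail for pivot_1), with no index arithmetic and no len<2 guard.
import Mathlib
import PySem

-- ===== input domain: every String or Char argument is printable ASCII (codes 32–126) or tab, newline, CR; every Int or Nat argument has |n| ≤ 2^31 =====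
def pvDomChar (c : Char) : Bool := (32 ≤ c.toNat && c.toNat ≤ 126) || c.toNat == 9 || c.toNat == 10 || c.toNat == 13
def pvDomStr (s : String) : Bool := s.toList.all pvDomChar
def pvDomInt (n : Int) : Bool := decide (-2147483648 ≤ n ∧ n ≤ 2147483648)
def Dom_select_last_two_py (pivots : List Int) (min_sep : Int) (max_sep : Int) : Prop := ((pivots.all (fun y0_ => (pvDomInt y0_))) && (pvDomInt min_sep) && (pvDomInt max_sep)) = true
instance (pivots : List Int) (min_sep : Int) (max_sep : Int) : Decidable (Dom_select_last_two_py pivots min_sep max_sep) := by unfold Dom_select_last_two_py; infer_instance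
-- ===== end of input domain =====

-- B replaces A's two descending index loops by one reversal followed by structural
-- recursion on the reversed list (objective: alternative decomposition, same cost).

-- ===== PORT A =====
-- literal transliteration of A: guard len < 2, then for i in range(len-1, 0, -1),
-- for j in range(i-1, -1, -1), first pair with min_sep <= sep <= max_sep (early return = findSome?)
def select_last_two_py (pivots : List Int) (min_sep : Int) (max_sep : Int) : Option (Int × Int) :=
  if pivots.length < 2 then none
  else
    (PySem.List.pyRange ((pivots.length : Int) - 1) 0 (-1)).findSome? (fun i =>
      let pivot_2 := PySem.List.pyGetD pivots i 0
      (PySem.List.pyRange (i - 1) (-1) (-1)).findSome? (fun j =>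
        let pivot_1 := PySem.List.pyGetD pivots j 0
        let sep := pivot_2 - pivot_1
        if min_sep ≤ sep ∧ sep ≤ max_sep then some (pivot_1, pivot_2) else none))

-- ===== PORT B =====
-- Source B's inner `for p1 in rev: …`
def altScan (min_sep : Int) (max_sep : Int) (p2 : Int) : List Int → Option (Int × Int)
  | [] => none
  | p1 :: rest =>
    if min_sep ≤ p2 - p1 ∧ p2 - p1 ≤ max_sep then some (p1, p2)
    else altScan min_sep max_sep p2 rest

-- Source B's `while rev:` loop, peeling the head of the reversed list
def altLoop (min_sep : Int) (max_sep : Int) : List Int → Option (Int × Int)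
  | [] => none
  | p2 :: rest =>
    match altScan min_sep max_sep p2 rest with
    | some r => some r
    | none => altLoop min_sep max_sep rest

def select_last_two_py_alt (pivots : List Int) (min_sep : Int) (max_sep : Int) : Option (Int × Int) :=
  altLoop min_sep max_sep pivots.reverse  -- pivots[::-1]

-- ===== PRECONDITION & SPEC =====
def Spec_select_last_two_py (pivots : List Int) (min_sep : Int) (max_sep : Int) (out : Option (Int × Int)) : Prop := out = select_last_two_py_alt pivots min_sep max_sep
instance (pivots : List Int) (min_sep : Int) (max_sep : Int) (out : Option (Int × Int)) : Decidable (Spec_select_last_two_py pivots min_sep max_sep out) := by unfold Spec_select_last_two_py; infer_instance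

-- ===== CLAIM (what is proved, stated in full; the proofs are below) =====
def Claim_equal_select_last_two_py : Prop := ∀ (pivots : List Int) (min_sep : Int) (max_sep : Int), Dom_select_last_two_py pivots min_sep max_sep → Spec_select_last_two_py pivots min_sep max_sep (select_last_two_py pivots min_sep max_sep)

-- ===== LEMMAS AND PROOFS =====

theorem findSome?_congr_mem {α β : Type} (f g : α → Option β) :
    ∀ (l : List α), (∀ a ∈ l, f a = g a) → l.findSome? f = l.findSome? g := by
  intro l
  induction l with
  | nil => intro _; rfl
  | cons a l ih =>
    intro h
    simp only [List.findSome?_cons, h a (List.mem_cons_self), ih (fun b hb => h b (List.mem_cons_of_mem a hb))]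

-- a descending index scan over the first k elements is a scan of (take k).reverse
theorem desc_findSome {β : Type} (f : Int → Option β) (l : List Int) :
    ∀ (k : Nat), k ≤ l.length →
    (PySem.List.pyRange ((k : Int) - 1) (-1) (-1)).findSome? (fun j => f (PySem.List.pyGetD l j 0))
      = ((l.take k).reverse).findSome? f := by
  intro k
  induction k with
  | zero =>
    intro _
    rw [PySem.List.pyRange_neg_one_eq_nil (by omega)]
    simp
  | succ k ih =>
    intro hk
    have hk' : k < l.length := by omega
    have hcons : PySem.List.pyRange (((k + 1 : Nat) : Int) - 1) (-1) (-1)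
        = (k : Int) :: PySem.List.pyRange ((k : Int) - 1) (-1) (-1) := by
      have := PySem.List.pyRange_neg_one_cons (a := (k : Int)) (b := -1) (by omega)
      simpa using this
    rw [hcons, List.findSome?_cons]
    have hget : PySem.List.pyGetD l ((k : Int)) 0 = l[k] := by
      rw [PySem.List.pyGetD_natCast, List.getD_eq_getElem l 0 hk']
    have htake : (l.take (k + 1)).reverse = l[k] :: (l.take k).reverse := by
      rw [List.take_add_one, List.getElem?_eq_getElem hk']
      simp
    rw [htake, List.findSome?_cons, hget, ih (by omega)]

-- the body of A's outer loop, as a function of the list and the outer index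
def aInner (min_sep max_sep : Int) (l : List Int) (i : Int) : Option (Int × Int) :=
  let pivot_2 := PySem.List.pyGetD l i 0
  (PySem.List.pyRange (i - 1) (-1) (-1)).findSome? (fun j =>
    let pivot_1 := PySem.List.pyGetD l j 0
    let sep := pivot_2 - pivot_1
    if min_sep ≤ sep ∧ sep ≤ max_sep then some (pivot_1, pivot_2) else none)

theorem aInner_append {min_sep max_sep : Int} (xs : List Int) (x : Int) (i : Int)
    (h0 : 0 ≤ i) (hi : i < xs.length) :
    aInner min_sep max_sep (xs ++ [x]) i = aInner min_sep max_sep xs i := by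
  unfold aInner
  have hget : ∀ (m : Int), 0 ≤ m → m < xs.length →
      PySem.List.pyGetD (xs ++ [x]) m 0 = PySem.List.pyGetD xs m 0 := by
    intro m hm0 hm
    obtain ⟨n, rfl⟩ := Int.eq_ofNat_of_zero_le hm0
    rw [PySem.List.pyGetD_natCast, PySem.List.pyGetD_natCast]
    have hn : n < xs.length := by exact_mod_cast hm
    rw [List.getD_eq_getElem _ 0 (by simp; omega), List.getD_eq_getElem _ 0 hn,
      List.getElem_append_left hn]
  rw [hget i h0 hi]
  apply findSome?_congr_mem
  intro j hj
  have hj' : -1 < j ∧ j ≤ i - 1 := (PySem.List.mem_pyRange_neg_one).1 hj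
  rw [hget j (by omega) (by omega)]

-- altScan is the first-match scan
theorem altScan_eq_findSome? (min_sep max_sep p2 : Int) (l : List Int) :
    altScan min_sep max_sep p2 l
      = l.findSome? (fun p1 =>
          if min_sep ≤ p2 - p1 ∧ p2 - p1 ≤ max_sep then some (p1, p2) else none) := by
  induction l with
  | nil => rfl
  | cons p1 rest ih =>
    simp only [altScan, List.findSome?_cons]
    split_ifs with h <;> simp [ih]

-- main correspondence: A's full descending double loop = B's loop on the reversed list
theorem main_loop (min_sep max_sep : Int) (l : List Int) :
    (PySem.List.pyRange ((l.length : Int) - 1) (-1) (-1)).findSome? (aInner min_sep max_sep l)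
      = altLoop min_sep max_sep l.reverse := by
  induction l using List.reverseRecOn with
  | nil =>
    rw [PySem.List.pyRange_neg_one_eq_nil (by simp)]
    rfl
  | append_singleton xs x ih =>
    have hn : ((xs ++ [x]).length : Int) - 1 = (xs.length : Int) := by simp
    rw [hn, PySem.List.pyRange_neg_one_cons (by omega), List.findSome?_cons]
    have hhead : aInner min_sep max_sep (xs ++ [x]) (xs.length : Int)
        = altScan min_sep max_sep x xs.reverse := by
      unfold aInner
      have hx : PySem.List.pyGetD (xs ++ [x]) ((xs.length : Nat) : Int) 0 = x := by
        rw [PySem.List.pyGetD_natCast, List.getD_eq_getElem _ 0 (by simp)]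
        simp
      rw [hx]
      refine (desc_findSome (fun p1 =>
        if min_sep ≤ x - p1 ∧ x - p1 ≤ max_sep then some (p1, x) else none)
        (xs ++ [x]) xs.length (by simp)).trans ?_
      rw [List.take_left, altScan_eq_findSome?]
    have htail :
        (PySem.List.pyRange ((xs.length : Int) - 1) (-1) (-1)).findSome?
            (aInner min_sep max_sep (xs ++ [x]))
          = altLoop min_sep max_sep xs.reverse := by
      rw [findSome?_congr_mem _ _ _ (by
        intro i hi
        have hi' := (PySem.List.mem_pyRange_neg_one).1 hi
        exact aInner_append xs x i (by omega) (by omega))]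
      exact ih
    rw [hhead, htail, List.reverse_append]
    simp only [List.reverse_singleton, List.singleton_append, altLoop]
    cases altScan min_sep max_sep x xs.reverse <;> rfl

-- extend A's outer range (which stops at 1) down to 0; index 0 contributes nothing
theorem range_to_zero (a : Int) (h : 0 ≤ a) :
    PySem.List.pyRange a (-1) (-1) = PySem.List.pyRange a 0 (-1) ++ [0] := by
  rw [PySem.List.pyRange_neg_one, PySem.List.pyRange_neg_one]
  have ha : (a - -1).toNat = (a - 0).toNat + 1 := by omega
  rw [ha, List.range_succ]
  simp [h]

-- ===== VERDICT (by name: the statement is the Claim_ definition above) =====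
theorem select_last_two_py_spec : Claim_equal_select_last_two_py := by
  intro pivots min_sep max_sep _
  unfold Spec_select_last_two_py select_last_two_py select_last_two_py_alt
  split_ifs with hlen
  · -- len < 2: B also returns none
    match pivots, hlen with
    | [], _ => rfl
    | [x], _ => rfl
  · have h2 : 2 ≤ pivots.length := by omega
    have := main_loop min_sep max_sep pivots
    rw [range_to_zero ((pivots.length : Int) - 1) (by omega),
      List.findSome?_append] at this
    rw [← this]
    unfold aInner
    simp
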